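-- pv_equiv track=rewrite | github.com/HarshYadav1711/CompassMind | compassmind/pdf_parse.py | _split_face_quality
-- ===== SOURCE A (Python) =====
-- from typing import Any, Optional
--
-- FACE_PREFIXES = ("calm_face", "tired_face", "tense_face", "happy_face", "neutral_face", "none")
--
-- QUALITY = frozenset({"clear", "vague", "conflicted"})
--
-- def _split_face_quality(blob: str) -> tuple[Optional[str], Optional[str]]:
--     """Split merged tokens like happy_facevague."""
--     blob = blob.strip()
--     if not blob:
--         return None, None
--     for face in FACE_PREFIXES:
--         if blob.startswith(face):
--             rest = blob[len(face) :]
--             if rest in QUALITY: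
--                 return face, rest
--             if not rest:
--                 return face, None
--     # try space-separated last two words
--     parts = blob.split()
--     if len(parts) >= 2 and parts[-1] in QUALITY:
--         face_guess = parts[-2]
--         if face_guess.endswith("_face") or face_guess == "none":
--             return face_guess, parts[-1]
--     return None, None
-- ===== SOURCE B (Python) =====
-- from typing import Any, Optional
--
-- FACE_PREFIXES = ("calm_face", "tired_face", "tense_face", "happy_face", "neutral_face", "none")
--
-- QUALITY = frozenset({"clear", "vague", "conflicted"})
--
-- # Precomputed table of every valid merged token: bare faces and face+quality concatenations.
-- _TABLE = {}
-- for _f in FACE_PREFIXES: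
--     _TABLE[_f] = (_f, None)
--     for _q in ("clear", "vague", "conflicted"):
--         _TABLE[_f + _q] = (_f, _q)
--
-- def _split_face_quality(blob: str) -> tuple[Optional[str], Optional[str]]:
--     """Split merged tokens like happy_facevague (table lookup)."""
--     blob = blob.strip()
--     if not blob:
--         return None, None
--     hit = _TABLE.get(blob)
--     if hit is not None:
--         return hit
--     # fallback: look at the last two whitespace-separated words, back to front
--     words = blob.split()[::-1]
--     if len(words) >= 2 and words[0] in QUALITY and (words[1].endswith("_face") or words[1] == "none"):
--         return words[1], words[0]
--     return None, None
-- ===== Notes on version B (the rewrite author's own statement) =====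
-- stated objective: alternative
-- what changed: Replaces A's face-prefix scan (startswith + drop + quality test per face) with a precomputed dictionary of all 24 valid merged tokens queried by a single lookup, and rewrites the space-separated fallback to pattern-match the reversed word list instead of negative indexing.
import Mathlib
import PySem

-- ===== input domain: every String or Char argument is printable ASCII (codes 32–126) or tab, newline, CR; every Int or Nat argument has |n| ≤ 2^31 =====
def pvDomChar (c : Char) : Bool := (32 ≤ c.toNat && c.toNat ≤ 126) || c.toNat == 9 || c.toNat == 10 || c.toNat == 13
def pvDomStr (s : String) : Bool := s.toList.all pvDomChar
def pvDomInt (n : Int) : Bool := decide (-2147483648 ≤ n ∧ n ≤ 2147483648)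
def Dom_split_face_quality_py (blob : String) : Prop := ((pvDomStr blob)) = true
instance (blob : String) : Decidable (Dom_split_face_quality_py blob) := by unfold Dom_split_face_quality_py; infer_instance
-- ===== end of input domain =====

-- B replaces A's face-prefix loop by a one-shot lookup in a precomputed table of all valid
-- merged tokens, and rewrites the fallback over the reversed word list (different decomposition).

-- ===== PORT A =====
def pvFaceList : List String := ["calm_face", "tired_face", "tense_face", "happy_face", "neutral_face", "none"]
def pvQualList : List String := ["clear", "vague", "conflicted"]

-- the space-separated last-two-words fallback of A
def pvAFallback (t : String) : Option String × Option String :=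
  let parts := PySem.Str.split₀ t
  if 2 ≤ parts.length then
    match PySem.List.pyGet? parts (-1), PySem.List.pyGet? parts (-2) with
    | some last, some fg =>
      if pvQualList.contains last then
        if PySem.Str.endswith fg "_face" || fg == "none" then (some fg, some last)
        else (none, none)
      else (none, none)
    | _, _ => (none, none)
  else (none, none)

-- A's for-loop over FACE_PREFIXES
def pvALoop (t : String) : List String → Option String × Option String
  | [] => pvAFallback t
  | f :: fs =>
    if PySem.Str.startswith t f then
      let rest := PySem.Str.slice t (some (f.length : Int)) none
      if pvQualList.contains rest then (some f, some rest)
      else if rest = "" then (some f, none)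
      else pvALoop t fs
    else pvALoop t fs

def split_face_quality_py (blob : String) : Option String × Option String :=
  let t := PySem.Str.strip blob
  if t = "" then (none, none) else pvALoop t pvFaceList

-- ===== PORT B =====
-- the precomputed table _TABLE of Source B, built by the same nested loop
def pvTable : PySem.Dict String (Option String × Option String) :=
  pvFaceList.foldl
    (fun d f =>
      pvQualList.foldl (fun d q => d.insert (f ++ q) (some f, some q)) (d.insert f (some f, none)))
    PySem.Dict.empty

-- Source B's fallback: reversed word list, pattern-matched  (blob.split()[::-1] ported as reverse,
-- exact by PySem.List.slice?_none_none_neg_one)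
def pvBFallback (t : String) : Option String × Option String :=
  match (PySem.Str.split₀ t).reverse with
  | last :: fg :: _ =>
    if pvQualList.contains last && (PySem.Str.endswith fg "_face" || fg == "none")
    then (some fg, some last) else (none, none)
  | _ => (none, none)

def split_face_quality_py_alt (blob : String) : Option String × Option String :=
  let t := PySem.Str.strip blob
  if t = "" then (none, none) else
    match pvTable.get? t with
    | some hit => hit
    | none => pvBFallback t

-- ===== PRECONDITION & SPEC =====
def Spec_split_face_quality_py (blob : String) (out : Option String × Option String) : Prop := out = split_face_quality_py_alt blob
instance (blob : String) (out : Option String × Option String) : Decidable (Spec_split_face_quality_py blob out) := by unfold Spec_split_face_quality_py; infer_instance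

-- ===== CLAIM (what is proved, stated in full; the proofs are below) =====
def Claim_equal_split_face_quality_py : Prop := ∀ (blob : String), Dom_split_face_quality_py blob → Spec_split_face_quality_py blob (split_face_quality_py blob)

-- ===== LEMMAS AND PROOFS =====

-- the table's keys, as a literal list
theorem pvTable_keys : pvTable.keys =
    ["calm_face", "calm_faceclear", "calm_facevague", "calm_faceconflicted",
     "tired_face", "tired_faceclear", "tired_facevague", "tired_faceconflicted",
     "tense_face", "tense_faceclear", "tense_facevague", "tense_faceconflicted",
     "happy_face", "happy_faceclear", "happy_facevague", "happy_faceconflicted",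
     "neutral_face", "neutral_faceclear", "neutral_facevague", "neutral_faceconflicted",
     "none", "noneclear", "nonevague", "noneconflicted"] := by decide

-- a prefix of l together with the matching drop pins l down
theorem pv_prefix_drop {f l : List Char} (h : f <+: l) : l = f ++ l.drop f.length := by
  obtain ⟨s, rfl⟩ := h
  simp

theorem pv_str_eq_of_toList {s t : String} (h : s.toList = t.toList) : s = t :=
  String.toList_inj.mp h

-- A's loop skips a face that yields no return
theorem pvALoop_skip {t f : String} {fs : List String}
    (hq : ∀ q ∈ pvQualList, t ≠ f ++ q) (hf : t ≠ f) :
    pvALoop t (f :: fs) = pvALoop t fs := by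
  by_cases hs : PySem.Str.startswith t f = true
  · have hpre : f.toList <+: t.toList := by
      simpa [PySem.Chars.startswith_iff] using hs
    have hdrop : (PySem.Str.slice t (some (f.length : Int)) none).toList
        = t.toList.drop f.length := by
      simp [PySem.Str.toList_slice, PySem.List.slice_from_natCast]
    have htl : t.toList = f.toList ++ t.toList.drop f.length := by
      simpa using pv_prefix_drop hpre
    have heq : ∀ q : String, PySem.Str.slice t (some (f.length : Int)) none = q → t = f ++ q := by
      intro q hrq
      apply pv_str_eq_of_toList
      rw [String.toList_append, htl]
      congr 1
      rw [← hdrop, hrq]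
    by_cases hc : pvQualList.contains (PySem.Str.slice t (some (f.length : Int)) none) = true
    · exfalso
      have : PySem.Str.slice t (some (f.length : Int)) none ∈ pvQualList := by
        simpa using hc
      simp only [pvQualList, List.mem_cons, List.not_mem_nil, or_false] at this
      rcases this with h | h | h
      · exact hq "clear" (by simp [pvQualList]) (heq _ h)
      · exact hq "vague" (by simp [pvQualList]) (heq _ h)
      · exact hq "conflicted" (by simp [pvQualList]) (heq _ h)
    · by_cases he : PySem.Str.slice t (some (f.length : Int)) none = ""
      · exact absurd (by simpa using heq "" he) hf
      · simp only [pvALoop]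
        rw [if_pos hs, if_neg hc, if_neg he]
  · simp only [pvALoop]
    rw [if_neg hs]

-- helpers to discharge the literal inequalities below
theorem pv_ne_app {t a b c : String} (h : t ≠ c) (he : a ++ b = c) : t ≠ a ++ b :=
  he ▸ h

theorem pv_skip_of {t f : String} (hc : t ≠ f ++ "clear") (hv : t ≠ f ++ "vague")
    (hco : t ≠ f ++ "conflicted") : ∀ q ∈ pvQualList, t ≠ f ++ q := by
  intro q hq
  simp only [pvQualList, List.mem_cons, List.not_mem_nil, or_false] at hq
  rcases hq with rfl | rfl | rfl <;> assumption

-- when t is none of the 24 table keys, A's whole loop falls through to the fallback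
theorem pvALoop_miss {t : String} (h : t ∉ pvTable.keys) :
    pvALoop t pvFaceList = pvAFallback t := by
  rw [pvTable_keys] at h
  simp only [List.mem_cons, List.not_mem_nil, or_false, not_or] at h
  obtain ⟨h1, h2, h3, h4, h5, h6, h7, h8, h9, h10, h11, h12,
          h13, h14, h15, h16, h17, h18, h19, h20, h21, h22, h23, h24⟩ := h
  show pvALoop t ["calm_face", "tired_face", "tense_face", "happy_face", "neutral_face", "none"] = _
  rw [pvALoop_skip (pv_skip_of (pv_ne_app h2 (by decide)) (pv_ne_app h3 (by decide)) (pv_ne_app h4 (by decide))) h1]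
  rw [pvALoop_skip (pv_skip_of (pv_ne_app h6 (by decide)) (pv_ne_app h7 (by decide)) (pv_ne_app h8 (by decide))) h5]
  rw [pvALoop_skip (pv_skip_of (pv_ne_app h10 (by decide)) (pv_ne_app h11 (by decide)) (pv_ne_app h12 (by decide))) h9]
  rw [pvALoop_skip (pv_skip_of (pv_ne_app h14 (by decide)) (pv_ne_app h15 (by decide)) (pv_ne_app h16 (by decide))) h13]
  rw [pvALoop_skip (pv_skip_of (pv_ne_app h18 (by decide)) (pv_ne_app h19 (by decide)) (pv_ne_app h20 (by decide))) h17]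
  rw [pvALoop_skip (pv_skip_of (pv_ne_app h22 (by decide)) (pv_ne_app h23 (by decide)) (pv_ne_app h24 (by decide))) h21]
  rfl

-- the two fallbacks agree (A indexes parts[-1]/parts[-2]; B matches the reversed list)
theorem pv_fallback_eq (t : String) : pvAFallback t = pvBFallback t := by
  unfold pvAFallback pvBFallback
  rcases hrev : (PySem.Str.split₀ t).reverse with _ | ⟨last, _ | ⟨fg, rest⟩⟩
  · have hlen : (PySem.Str.split₀ t).length = 0 := by
      simpa using congrArg List.length hrev
    simp [hlen]
  · have hlen : (PySem.Str.split₀ t).length = 1 := by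
      simpa using congrArg List.length hrev
    simp [hlen]
  · have hlen : 2 ≤ (PySem.Str.split₀ t).length := by
      have := congrArg List.length hrev
      simp at this
      omega
    have hg1 : PySem.List.pyGet? (PySem.Str.split₀ t) (-1) = some last := by
      rw [PySem.List.pyGet?_neg_ofNat _ 1 (by omega) (by omega)]
      have h0 := List.getElem?_reverse (l := PySem.Str.split₀ t) (i := 0) (by omega)
      rw [hrev] at h0
      simpa using h0.symm
    have hg2 : PySem.List.pyGet? (PySem.Str.split₀ t) (-2) = some fg := by
      rw [PySem.List.pyGet?_neg_ofNat _ 2 (by omega) (by omega)]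
      have h1 := List.getElem?_reverse (l := PySem.Str.split₀ t) (i := 1) (by omega)
      rw [hrev] at h1
      have h2 : (PySem.Str.split₀ t).length - 1 - 1 = (PySem.Str.split₀ t).length - 2 := by omega
      rw [h2] at h1
      simpa using h1.symm
    rw [if_pos (by simpa using hlen), hg1, hg2]
    cases hA : pvQualList.contains last <;>
      cases hB : (PySem.Str.endswith fg "_face" || fg == "none") <;>
        simp_all

-- the hit case: for each of the 24 keys both sides agree
theorem pv_hit {t : String} (h : t ∈ pvTable.keys) :
    pvALoop t pvFaceList = (match pvTable.get? t with
      | some hit => hit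
      | none => pvBFallback t) := by
  rw [pvTable_keys] at h
  fin_cases h <;> decide

-- ===== VERDICT (by name: the statement is the Claim_ definition above) =====
theorem split_face_quality_py_spec : Claim_equal_split_face_quality_py := by
  intro blob _
  show split_face_quality_py blob = split_face_quality_py_alt blob
  unfold split_face_quality_py split_face_quality_py_alt
  by_cases h0 : PySem.Str.strip blob = ""
  · rw [if_pos h0, if_pos h0]
  · rw [if_neg h0, if_neg h0]
    by_cases hk : PySem.Str.strip blob ∈ pvTable.keys
    · exact pv_hit hk
    · have hget : pvTable.get? (PySem.Str.strip blob) = none :=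
        (PySem.Dict.get?_eq_none_iff_not_mem_keys pvTable _).mpr hk
      rw [pvALoop_miss hk, hget, pv_fallback_eq]
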